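-- pv_equiv track=rewrite | github.com/HighlyTrainedNeuralNetwork/InterestingPuzzles | Activation and Min Queries on Grid of Values/initialSolution.py | solution
-- ===== SOURCE A (Python) =====
-- def solution(n, m, queries):
--     grid = []
--     for i in range(n):
--         grid.append([])
--         for j in range(m):
--             grid[i].append((i + 1) * (j + 1))
--     deactivated = {"rows": set(), "columns": set()}
--     # minLoc = [42, None]
--     def minActive(grid):
--         values = []
--         for i in range(n):
--             if i not in deactivated["rows"]:
--                 for j in range(m):
--                     if j not in deactivated["columns"]:
--                         values.append(grid[i][j])
--                 else:
--                     pass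
--             else:
--                 continue
--         return min(values)
--
--     def deactiveRow(grid, row):
--         deactivated["rows"].add(row - 1)
--
--     def deactiveColumn(grid, column):
--         deactivated["columns"].add(column - 1)
--
--     calculated = []
--     for query in queries:
--         if query in queries:
--             if query[0] == 0:
--                 calculated.append(minActive(grid))
--             elif query[0] == 1:
--                 deactiveRow(grid, query[1])
--             elif query[0] == 2:
--                 deactiveColumn(grid, query[1])
--     return calculated
-- ===== SOURCE B (Python) =====
-- def solution(n, m, queries):
--     # min over active cells of (i+1)(j+1) = (min active row + 1) * (min active col + 1);
--     # track the smallest active row/column with monotone pointers: O(1) amortized per query.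
--     dr = set()
--     dc = set()
--     r = 0
--     c = 0
--     out = []
--     for q in queries:
--         t = q[0]
--         if t == 0:
--             while r in dr:
--                 r += 1
--             while c in dc:
--                 c += 1
--             out.append((r + 1) * (c + 1))
--         elif t == 1:
--             dr.add(q[1] - 1)
--         elif t == 2:
--             dc.add(q[1] - 1)
--     return out
-- ===== Notes on version B (the rewrite author's own statement) =====
-- stated objective: faster
-- what changed: B never builds the n*m grid and answers each min query as (smallest active row + 1)*(smallest active column + 1), maintaining the two minima with monotone skip pointers instead of A's full scan of all active cells.
import Mathlib
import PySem

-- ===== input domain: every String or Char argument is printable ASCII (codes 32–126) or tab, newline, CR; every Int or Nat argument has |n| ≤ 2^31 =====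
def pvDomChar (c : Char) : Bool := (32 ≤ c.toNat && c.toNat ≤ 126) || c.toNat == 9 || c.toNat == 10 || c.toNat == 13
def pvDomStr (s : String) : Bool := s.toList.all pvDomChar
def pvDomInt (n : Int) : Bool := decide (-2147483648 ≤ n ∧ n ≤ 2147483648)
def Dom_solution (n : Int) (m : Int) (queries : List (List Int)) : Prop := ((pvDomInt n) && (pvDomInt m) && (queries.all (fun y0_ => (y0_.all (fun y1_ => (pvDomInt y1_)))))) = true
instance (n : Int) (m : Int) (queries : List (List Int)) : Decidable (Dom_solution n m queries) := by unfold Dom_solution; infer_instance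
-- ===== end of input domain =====

-- B replaces A's O(n*m) scan per min query by (smallest active row + 1) * (smallest active column + 1),
-- maintained with monotone skip pointers; proved equal wherever A returns (Pre_).

-- ===== PORT A =====
-- minActive(grid): collects grid[i][j] over active rows/columns and takes min.
-- grid indexing is ported with pyGetD (the indices produced by the ranges are always in range);
-- min([]) raises ValueError in Python: the `.getD 0` branch is reached only outside Pre_.
def minActiveA (n : Int) (m : Int) (grid : List (List Int))
    (dr dc : PySem.Set Int) : Int :=
  let values := (PySem.List.pyRange 0 n 1).foldl (fun acc i =>
    if !(PySem.Set.contains dr i) then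
      (PySem.List.pyRange 0 m 1).foldl (fun acc2 j =>
        if !(PySem.Set.contains dc j) then
          acc2 ++ [PySem.List.pyGetD (PySem.List.pyGetD grid i []) j 0]
        else acc2) acc
    else acc) []
  (PySem.List.min? values (fun x => x)).getD 0

-- A's query loop body; query[0] / query[1] via pyGetD (Python raises IndexError on short
-- queries: outside Pre_). The always-true 'if query in queries' of A is kept.
def stepA (n : Int) (m : Int) (grid : List (List Int)) (queries : List (List Int))
    (st : PySem.Set Int × PySem.Set Int × List Int) (q : List Int) :
    PySem.Set Int × PySem.Set Int × List Int :=
  let (dr, dc, outA) := st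
  if queries.contains q then
    let t := PySem.List.pyGetD q 0 0
    if t = 0 then (dr, dc, outA ++ [minActiveA n m grid dr dc])
    else if t = 1 then (PySem.Set.add dr (PySem.List.pyGetD q 1 0 - 1), dc, outA)
    else if t = 2 then (dr, PySem.Set.add dc (PySem.List.pyGetD q 1 0 - 1), outA)
    else (dr, dc, outA)
  else (dr, dc, outA)

def solution (n : Int) (m : Int) (queries : List (List Int)) : List Int :=
  let grid := (PySem.List.pyRange 0 n 1).map (fun i =>
    (PySem.List.pyRange 0 m 1).map (fun j => (i + 1) * (j + 1)))
  (queries.foldl (stepA n m grid queries) (PySem.Set.empty, PySem.Set.empty, [])).2.2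

-- ===== PORT B =====
-- 'while r in dr: r += 1'; fuel = size of the set (each successful step consumes a distinct
-- element of the set, so |dr| steps always suffice: skipB_spec below).
def skipB (fuel : Nat) (s : PySem.Set Int) (r : Int) : Int :=
  match fuel with
  | 0 => r
  | fuel + 1 => if PySem.Set.contains s r then skipB fuel s (r + 1) else r

def stepB (st : PySem.Set Int × PySem.Set Int × Int × Int × List Int) (q : List Int) :
    PySem.Set Int × PySem.Set Int × Int × Int × List Int :=
  let (dr, dc, r, c, out) := st
  let t := PySem.List.pyGetD q 0 0
  if t = 0 then
    let r' := skipB dr.length dr r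
    let c' := skipB dc.length dc c
    (dr, dc, r', c', out ++ [(r' + 1) * (c' + 1)])
  else if t = 1 then (PySem.Set.add dr (PySem.List.pyGetD q 1 0 - 1), dc, r, c, out)
  else if t = 2 then (dr, PySem.Set.add dc (PySem.List.pyGetD q 1 0 - 1), r, c, out)
  else (dr, dc, r, c, out)

def solution_alt (n : Int) (m : Int) (queries : List (List Int)) : List Int :=
  (queries.foldl stepB (PySem.Set.empty, PySem.Set.empty, 0, 0, [])).2.2.2.2

-- ===== PRECONDITION & SPEC =====
-- Pre_ excludes exactly the inputs on which A raises: a query missing its first element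
-- (IndexError), a deactivation query missing its argument (IndexError), and a min query issued
-- after the preceding deactivations have emptied the active rows or columns (min([]) ValueError).
-- The last condition depends on the deactivations preceding each min query, so Pre_ is a scan over
-- the query list tracking only the two deactivated index sets (no output of either port is computed).
def preChk (n : Int) (m : Int) (dr dc : PySem.Set Int) : List (List Int) → Bool
  | [] => true
  | q :: qs =>
    match q with
    | [] => false
    | t :: rest =>
      if t = 0 then
        if (PySem.List.pyRange 0 n 1).any (fun i => !(PySem.Set.contains dr i)) then
          if (PySem.List.pyRange 0 m 1).any (fun j => !(PySem.Set.contains dc j)) then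
            preChk n m dr dc qs
          else false
        else false
      else if t = 1 then
        match rest with
        | [] => false
        | v :: _ => preChk n m (PySem.Set.add dr (v - 1)) dc qs
      else if t = 2 then
        match rest with
        | [] => false
        | v :: _ => preChk n m dr (PySem.Set.add dc (v - 1)) qs
      else preChk n m dr dc qs

def Pre_solution (n : Int) (m : Int) (queries : List (List Int)) : Prop :=
  preChk n m PySem.Set.empty PySem.Set.empty queries = true

instance (n : Int) (m : Int) (queries : List (List Int)) : Decidable (Pre_solution n m queries) := by
  unfold Pre_solution; infer_instance

def pvWitness_solution : Int × Int × List (List Int) :=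
  (2, 3, [[0], [1, 1], [0], [2, 2], [0], [5, 9]])

def Spec_solution (n : Int) (m : Int) (queries : List (List Int)) (out : List Int) : Prop := out = solution_alt n m queries
instance (n : Int) (m : Int) (queries : List (List Int)) (out : List Int) : Decidable (Spec_solution n m queries out) := by unfold Spec_solution; infer_instance

-- ===== CLAIM (what is proved, stated in full; the proofs are below) =====
def Claim_equal_solution : Prop := ∀ (n : Int) (m : Int) (queries : List (List Int)), Dom_solution n m queries → Pre_solution n m queries → Spec_solution n m queries (solution n m queries)

-- ===== LEMMAS AND PROOFS =====

theorem countP_succ_le (s : List Int) (r : Int) (hnd : s.Nodup) (hr : r ∈ s) :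
    s.countP (fun x => decide (r + 1 ≤ x)) + 1 ≤ s.countP (fun x => decide (r ≤ x)) := by
  induction s with
  | nil => simp at hr
  | cons a t ih =>
    rcases List.nodup_cons.mp hnd with ⟨hat, hndt⟩
    simp only [List.countP_cons]
    by_cases heq : a = r
    · subst heq
      have h1 : t.countP (fun x => decide (a + 1 ≤ x)) ≤ t.countP (fun x => decide (a ≤ x)) :=
        List.countP_mono_left (by intro x _ h; simp only [decide_eq_true_eq] at h ⊢; omega)
      have e1 : decide (a ≤ a) = true := by simp
      have e2 : decide (a + 1 ≤ a) = false := by simp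
      rw [e1, e2]
      simp only [if_true, if_false, Bool.false_eq_true]
      omega
    · have hrt : r ∈ t := by
        rcases List.mem_cons.mp hr with h | h
        · exact absurd h.symm heq
        · exact h
      have hih := ih hndt hrt
      by_cases h3 : r ≤ a
      · by_cases h2 : r + 1 ≤ a
        · have e2 : decide (r + 1 ≤ a) = true := by simp [h2]
          have e3 : decide (r ≤ a) = true := by simp [h3]
          rw [e2, e3]; simp only [if_true, if_false, Bool.false_eq_true]; omega
        · have e2 : decide (r + 1 ≤ a) = false := by simp; omega
          have e3 : decide (r ≤ a) = true := by simp [h3]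
          rw [e2, e3]; simp only [if_true, if_false, Bool.false_eq_true]; omega
      · have e2 : decide (r + 1 ≤ a) = false := by simp; omega
        have e3 : decide (r ≤ a) = false := by simp; omega
        rw [e2, e3]; simp only [if_true, if_false, Bool.false_eq_true]; omega

theorem skipB_spec (fuel : Nat) (s : PySem.Set Int) (hnd : s.Nodup) (r : Int)
    (h : s.countP (fun x => decide (r ≤ x)) ≤ fuel) :
    skipB fuel s r ∉ s ∧ r ≤ skipB fuel s r ∧
      ∀ x, r ≤ x → x < skipB fuel s r → x ∈ s := by
  induction fuel generalizing r with
  | zero =>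
    have hns : r ∉ s := by
      intro hr
      have : 0 < s.countP (fun x => decide (r ≤ x)) :=
        List.countP_pos_iff.mpr ⟨r, hr, by simp⟩
      omega
    exact ⟨hns, le_refl r, fun x h1 h2 => absurd (lt_of_le_of_lt h1 h2) (lt_irrefl r)⟩
  | succ fuel ih =>
    by_cases hc : PySem.Set.contains s r = true
    · have hr : r ∈ s := (PySem.Set.contains_iff s r).mp hc
      have hcnt := countP_succ_le s r hnd hr
      have hconv : s.countP (fun x => decide (r + 1 ≤ x)) ≤ fuel := by omega
      obtain ⟨h1, h2, h3⟩ := ih (r + 1) hconv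
      have hstep : skipB (fuel + 1) s r = skipB fuel s (r + 1) := by simp [skipB, hr]
      rw [hstep]
      refine ⟨h1, by omega, ?_⟩
      intro x hx1 hx2
      rcases eq_or_lt_of_le hx1 with rfl | hlt
      · exact hr
      · exact h3 x (by omega) hx2
    · have hr : r ∉ s := fun hm => hc ((PySem.Set.contains_iff s r).mpr hm)
      have hstep : skipB (fuel + 1) s r = r := by simp [skipB, hr]
      rw [hstep]
      exact ⟨hr, le_refl r, fun x h1 h2 => absurd (lt_of_le_of_lt h1 h2) (lt_irrefl r)⟩

theorem contains_false_of_not_mem {s : PySem.Set Int} {x : Int} (h : x ∉ s) :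
    PySem.Set.contains s x = false :=
  Bool.eq_false_iff.mpr (fun hc => h ((PySem.Set.contains_iff s x).mp hc))

theorem minActive_eq (n m : Int) (dr dc : PySem.Set Int) (r' c' : Int)
    (hr0 : 0 ≤ r') (hc0 : 0 ≤ c') (hrn : r' < n) (hcm : c' < m)
    (hrmem : r' ∉ dr) (hcmem : c' ∉ dc)
    (hrlow : ∀ x : Int, 0 ≤ x → x ∉ dr → r' ≤ x)
    (hclow : ∀ x : Int, 0 ≤ x → x ∉ dc → c' ≤ x) :
    minActiveA n m ((PySem.List.pyRange 0 n 1).map (fun i =>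
      (PySem.List.pyRange 0 m 1).map (fun j => (i + 1) * (j + 1)))) dr dc
      = (r' + 1) * (c' + 1) := by
  unfold minActiveA
  set AR := (PySem.List.pyRange 0 n 1).filter (fun i => !(PySem.Set.contains dr i)) with hAR
  set AC := (PySem.List.pyRange 0 m 1).filter (fun j => !(PySem.Set.contains dc j)) with hAC
  have hvalues : (PySem.List.pyRange 0 n 1).foldl (fun acc i =>
      if !(PySem.Set.contains dr i) then
        (PySem.List.pyRange 0 m 1).foldl (fun acc2 j =>
          if !(PySem.Set.contains dc j) then
            acc2 ++ [PySem.List.pyGetD (PySem.List.pyGetD ((PySem.List.pyRange 0 n 1).map (fun i =>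
              (PySem.List.pyRange 0 m 1).map (fun j => (i + 1) * (j + 1)))) i []) j 0]
          else acc2) acc
      else acc) []
      = AR.flatMap (fun i => AC.map (fun j => (i + 1) * (j + 1))) := by
    rw [PySem.List.foldl_if_eq_foldl_filter]
    rw [← hAR]
    have hcong : ∀ i ∈ AR, ∀ acc : List Int,
        (PySem.List.pyRange 0 m 1).foldl (fun acc2 j =>
          if (!PySem.Set.contains dc j) = true then
            acc2 ++ [PySem.List.pyGetD (PySem.List.pyGetD ((PySem.List.pyRange 0 n 1).map (fun i =>
              (PySem.List.pyRange 0 m 1).map (fun j => (i + 1) * (j + 1)))) i []) j 0]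
          else acc2) acc
          = acc ++ AC.map (fun j => (i + 1) * (j + 1)) := by
      intro i hi acc
      have hiR : i ∈ PySem.List.pyRange 0 n 1 := (List.mem_filter.mp hi).1
      obtain ⟨hi0, hin⟩ := (PySem.List.mem_pyRange_one).mp hiR
      rw [PySem.List.foldl_append_if, ← hAC]
      congr 1
      apply List.map_congr_left
      intro j hj
      have hjR : j ∈ PySem.List.pyRange 0 m 1 := (List.mem_filter.mp hj).1
      obtain ⟨hj0, hjm⟩ := (PySem.List.mem_pyRange_one).mp hjR
      rw [PySem.List.pyGetD_map_pyRange_of_nonneg _ _ _ _ hi0 hin,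
          PySem.List.pyGetD_map_pyRange_of_nonneg _ _ _ _ hj0 hjm]
    have hrw := PySem.List.foldl_congr_mem' (l := AR) (init := ([] : List Int))
      (f := fun acc i => (PySem.List.pyRange 0 m 1).foldl (fun acc2 j =>
          if (!PySem.Set.contains dc j) = true then
            acc2 ++ [PySem.List.pyGetD (PySem.List.pyGetD ((PySem.List.pyRange 0 n 1).map (fun i =>
              (PySem.List.pyRange 0 m 1).map (fun j => (i + 1) * (j + 1)))) i []) j 0]
          else acc2) acc)
      (g := fun acc i => acc ++ AC.map (fun j => (i + 1) * (j + 1))) hcong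
    rw [hrw]
    rw [PySem.List.foldl_append_eq_flatMap]
    simp
  rw [hvalues]
  have hrAR : r' ∈ AR := List.mem_filter.mpr ⟨(PySem.List.mem_pyRange_one).mpr ⟨hr0, hrn⟩,
    by rw [contains_false_of_not_mem hrmem]; rfl⟩
  have hcAC : c' ∈ AC := List.mem_filter.mpr ⟨(PySem.List.mem_pyRange_one).mpr ⟨hc0, hcm⟩,
    by rw [contains_false_of_not_mem hcmem]; rfl⟩
  have hmem : (r' + 1) * (c' + 1) ∈ AR.flatMap (fun i => AC.map (fun j => (i + 1) * (j + 1))) :=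
    List.mem_flatMap.mpr ⟨r', hrAR, List.mem_map.mpr ⟨c', hcAC, rfl⟩⟩
  have hle : ∀ v ∈ AR.flatMap (fun i => AC.map (fun j => (i + 1) * (j + 1))),
      (r' + 1) * (c' + 1) ≤ v := by
    intro v hv
    obtain ⟨i, hi, hv2⟩ := List.mem_flatMap.mp hv
    obtain ⟨j, hj, rfl⟩ := List.mem_map.mp hv2
    obtain ⟨hiR, hiC⟩ := List.mem_filter.mp hi
    obtain ⟨hjR, hjC⟩ := List.mem_filter.mp hj
    obtain ⟨hi0, _⟩ := (PySem.List.mem_pyRange_one).mp hiR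
    obtain ⟨hj0, _⟩ := (PySem.List.mem_pyRange_one).mp hjR
    have hinotin : i ∉ dr := by
      intro hc; rw [(PySem.Set.contains_iff dr i).mpr hc] at hiC; simp at hiC
    have hjnotin : j ∉ dc := by
      intro hc; rw [(PySem.Set.contains_iff dc j).mpr hc] at hjC; simp at hjC
    have h1 : r' + 1 ≤ i + 1 := by have := hrlow i hi0 hinotin; omega
    have h2 : c' + 1 ≤ j + 1 := by have := hclow j hj0 hjnotin; omega
    exact mul_le_mul h1 h2 (by omega) (by omega)
  cases hmin : PySem.List.min? (AR.flatMap (fun i => AC.map (fun j => (i + 1) * (j + 1)))) (fun x => x) with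
  | none =>
    rw [PySem.List.min?_eq_none_iff] at hmin
    rw [hmin] at hmem
    simp at hmem
  | some v0 =>
    have hv0mem := PySem.List.min?_mem hmin
    have hv0min := PySem.List.min?_isMin hmin
    have h1 : v0 ≤ (r' + 1) * (c' + 1) := hv0min _ hmem
    have h2 : (r' + 1) * (c' + 1) ≤ v0 := hle v0 hv0mem
    show (PySem.List.min? (List.flatMap (fun i => List.map (fun j => (i + 1) * (j + 1)) AC) AR) fun x => x).getD 0 = (r' + 1) * (c' + 1)
    rw [hmin]; exact le_antisymm h1 h2

theorem loop_eq (n m : Int) (queries : List (List Int)) (qs : List (List Int))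
    (hsub : ∀ q ∈ qs, q ∈ queries)
    (dr dc : PySem.Set Int) (out : List Int) (r c : Int)
    (hndr : dr.Nodup) (hndc : dc.Nodup)
    (hr0 : 0 ≤ r) (hc0 : 0 ≤ c)
    (hrI : ∀ x : Int, 0 ≤ x → x < r → x ∈ dr) (hcI : ∀ x : Int, 0 ≤ x → x < c → x ∈ dc)
    (hpre : preChk n m dr dc qs = true) :
    (qs.foldl (stepA n m ((PySem.List.pyRange 0 n 1).map (fun i =>
        (PySem.List.pyRange 0 m 1).map (fun j => (i + 1) * (j + 1)))) queries)
      (dr, dc, out)).2.2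
      = (qs.foldl stepB (dr, dc, r, c, out)).2.2.2.2 := by
  induction qs generalizing dr dc out r c with
  | nil => rfl
  | cons q qs ih =>
    have hsub' : ∀ q' ∈ qs, q' ∈ queries := fun q' hq => hsub q' (List.mem_cons_of_mem _ hq)
    have hqmem : queries.contains q = true := List.elem_eq_true_of_mem (hsub q List.mem_cons_self)
    match q with
    | [] => simp [preChk] at hpre
    | t :: rest =>
      by_cases ht0 : t = 0
      · subst ht0
        simp only [preChk, if_pos rfl] at hpre
        rw [if_pos trivial] at hpre
        have hsplit : ((PySem.List.pyRange 0 n 1).any (fun i => !(PySem.Set.contains dr i))) = true ∧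
            ((PySem.List.pyRange 0 m 1).any (fun j => !(PySem.Set.contains dc j))) = true ∧
            preChk n m dr dc qs = true := by
          split at hpre
          · split at hpre
            · exact ⟨by assumption, by assumption, hpre⟩
            · simp at hpre
          · simp at hpre
        obtain ⟨hany1, hany2, hpre'⟩ := hsplit
        obtain ⟨i, hiR, hiA⟩ := List.any_eq_true.mp hany1
        obtain ⟨j, hjR, hjA⟩ := List.any_eq_true.mp hany2
        obtain ⟨hi0, hin⟩ := (PySem.List.mem_pyRange_one).mp hiR
        obtain ⟨hj0, hjm⟩ := (PySem.List.mem_pyRange_one).mp hjR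
        have hinot : i ∉ dr := by
          intro hc'; rw [(PySem.Set.contains_iff dr i).mpr hc'] at hiA; simp at hiA
        have hjnot : j ∉ dc := by
          intro hc'; rw [(PySem.Set.contains_iff dc j).mpr hc'] at hjA; simp at hjA
        obtain ⟨hrN, hrLe, hrCov⟩ := skipB_spec dr.length dr hndr r List.countP_le_length
        obtain ⟨hcN, hcLe, hcCov⟩ := skipB_spec dc.length dc hndc c List.countP_le_length
        set r' := skipB dr.length dr r with hr'
        set c' := skipB dc.length dc c with hc'
        have hrI' : ∀ x : Int, 0 ≤ x → x < r' → x ∈ dr := by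
          intro x hx1 hx2
          by_cases hxr : x < r
          · exact hrI x hx1 hxr
          · exact hrCov x (by omega) hx2
        have hcI' : ∀ x : Int, 0 ≤ x → x < c' → x ∈ dc := by
          intro x hx1 hx2
          by_cases hxc : x < c
          · exact hcI x hx1 hxc
          · exact hcCov x (by omega) hx2
        have hrlow : ∀ x : Int, 0 ≤ x → x ∉ dr → r' ≤ x := by
          intro x hx1 hx2
          by_contra hlt
          exact hx2 (hrI' x hx1 (by omega))
        have hclow : ∀ x : Int, 0 ≤ x → x ∉ dc → c' ≤ x := by
          intro x hx1 hx2
          by_contra hlt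
          exact hx2 (hcI' x hx1 (by omega))
        have hr'n : r' < n := by have := hrlow i hi0 hinot; omega
        have hc'm : c' < m := by have := hclow j hj0 hjnot; omega
        have e0 : PySem.List.pyGetD ((0 : Int) :: rest) 0 0 = 0 := by simp [pysem]
        have hA : stepA n m ((PySem.List.pyRange 0 n 1).map (fun i =>
            (PySem.List.pyRange 0 m 1).map (fun j => (i + 1) * (j + 1)))) queries
            (dr, dc, out) (0 :: rest)
            = (dr, dc, out ++ [(r' + 1) * (c' + 1)]) := by
          simp only [stepA, hqmem, if_true, e0, if_pos rfl]
          rw [minActive_eq n m dr dc r' c' (by omega) (by omega) hr'n hc'm hrN hcN hrlow hclow]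
        have hB : stepB (dr, dc, r, c, out) (0 :: rest)
            = (dr, dc, r', c', out ++ [(r' + 1) * (c' + 1)]) := by
          simp only [stepB, e0]
          rw [if_pos trivial, ← hr', ← hc']
        rw [List.foldl_cons, List.foldl_cons, hA, hB]
        exact ih hsub' dr dc (out ++ [(r' + 1) * (c' + 1)]) r' c' hndr hndc
          (by omega) (by omega) hrI' hcI' hpre'
      · by_cases ht1 : t = 1
        · subst ht1
          match rest with
          | [] => simp [preChk] at hpre
          | v :: rest' =>
            have hpre' : preChk n m (PySem.Set.add dr (v - 1)) dc qs = true := by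
              simpa [preChk] using hpre
            have e0 : PySem.List.pyGetD ((1 : Int) :: v :: rest') 0 0 = 1 := by simp [pysem]
            have e1 : PySem.List.pyGetD ((1 : Int) :: v :: rest') 1 0 = v := by simp [pysem]
            have hA : stepA n m ((PySem.List.pyRange 0 n 1).map (fun i =>
                (PySem.List.pyRange 0 m 1).map (fun j => (i + 1) * (j + 1)))) queries
                (dr, dc, out) (1 :: v :: rest')
                = (PySem.Set.add dr (v - 1), dc, out) := by
              simp only [stepA, hqmem, if_true, e0, e1]
              norm_num
            have hB : stepB (dr, dc, r, c, out) (1 :: v :: rest')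
                = (PySem.Set.add dr (v - 1), dc, r, c, out) := by
              simp only [stepB, e0, e1]
              norm_num
            rw [List.foldl_cons, List.foldl_cons, hA, hB]
            exact ih hsub' (PySem.Set.add dr (v - 1)) dc out r c
              (PySem.Set.nodup_add _ _ hndr) hndc hr0 hc0
              (fun x h1 h2 => (PySem.Set.mem_add _ _ _).mpr (Or.inl (hrI x h1 h2))) hcI hpre'
        · by_cases ht2 : t = 2
          · subst ht2
            match rest with
            | [] => simp [preChk] at hpre
            | v :: rest' =>
              have hpre' : preChk n m dr (PySem.Set.add dc (v - 1)) qs = true := by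
                simpa [preChk] using hpre
              have e0 : PySem.List.pyGetD ((2 : Int) :: v :: rest') 0 0 = 2 := by simp [pysem]
              have e1 : PySem.List.pyGetD ((2 : Int) :: v :: rest') 1 0 = v := by simp [pysem]
              have hA : stepA n m ((PySem.List.pyRange 0 n 1).map (fun i =>
                  (PySem.List.pyRange 0 m 1).map (fun j => (i + 1) * (j + 1)))) queries
                  (dr, dc, out) (2 :: v :: rest')
                  = (dr, PySem.Set.add dc (v - 1), out) := by
                simp only [stepA, hqmem, if_true, e0, e1]
                norm_num
              have hB : stepB (dr, dc, r, c, out) (2 :: v :: rest')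
                  = (dr, PySem.Set.add dc (v - 1), r, c, out) := by
                simp only [stepB, e0, e1]
                norm_num
              rw [List.foldl_cons, List.foldl_cons, hA, hB]
              exact ih hsub' dr (PySem.Set.add dc (v - 1)) out r c
                hndr (PySem.Set.nodup_add _ _ hndc) hr0 hc0
                hrI (fun x h1 h2 => (PySem.Set.mem_add _ _ _).mpr (Or.inl (hcI x h1 h2))) hpre'
          · have hpre' : preChk n m dr dc qs = true := by
              simp only [preChk, if_neg ht0, if_neg ht1, if_neg ht2] at hpre
              exact hpre
            have e0 : PySem.List.pyGetD (t :: rest) 0 0 = t := by simp [pysem]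
            have hA : stepA n m ((PySem.List.pyRange 0 n 1).map (fun i =>
                (PySem.List.pyRange 0 m 1).map (fun j => (i + 1) * (j + 1)))) queries
                (dr, dc, out) (t :: rest) = (dr, dc, out) := by
              simp only [stepA, hqmem, if_true, e0, if_neg ht0, if_neg ht1, if_neg ht2]
            have hB : stepB (dr, dc, r, c, out) (t :: rest) = (dr, dc, r, c, out) := by
              simp only [stepB, e0, if_neg ht0, if_neg ht1, if_neg ht2]
            rw [List.foldl_cons, List.foldl_cons, hA, hB]
            exact ih hsub' dr dc out r c hndr hndc hr0 hc0 hrI hcI hpre'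

-- ===== VERDICT (by name: the statement is the Claim_ definition above) =====
theorem solution_spec : Claim_equal_solution := by
  intro n m queries _ hpre
  unfold Spec_solution solution solution_alt
  exact loop_eq n m queries queries (fun q hq => hq)
    PySem.Set.empty PySem.Set.empty [] 0 0 List.nodup_nil List.nodup_nil
    le_rfl le_rfl (fun x h1 h2 => absurd h2 (by omega)) (fun x h1 h2 => absurd h2 (by omega)) hpre
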